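-- pv_equiv track=rewrite | github.com/MatthewHA233/mw-extracted | MW数据站爬虫/2批量数据中英文名爬取.py | extract_all_fields
-- ===== SOURCE A (Python) =====
-- def extract_all_fields(items):
--     """
--     从所有项中提取所有字段
--     将image相关字段放到最后
--     """
--     all_fields = set()
--     for item in items:
--         all_fields.update(item.keys())
--
--     # 分离image字段和其他字段
--     image_fields = []
--     other_fields = []
--
--     for field in sorted(all_fields):
--         if 'image' in field.lower():
--             image_fields.append(field)
--         else:
--             other_fields.append(field)
--
--     # 其他字段在前，image字段在后
--     return other_fields + image_fields
-- ===== SOURCE B (Python) =====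
-- def _insert_unique(field, lst):
--     """Insert field into a strictly sorted list, keeping order, skipping duplicates."""
--     i = 0
--     while i < len(lst) and lst[i] < field:
--         i += 1
--     if i < len(lst) and lst[i] == field:
--         return lst
--     return lst[:i] + [field] + lst[i:]
--
--
-- def extract_all_fields(items):
--     """
--     从所有项中提取所有字段
--     将image相关字段放到最后
--     """
--     other, image = [], []
--     for item in items:
--         for field in item.keys():
--             if 'image' in field.lower():
--                 image = _insert_unique(field, image)
--             else:
--                 other = _insert_unique(field, other)
--     return other + image
-- ===== Notes on version B (the rewrite author's own statement) =====
-- stated objective: alternative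
-- what changed: Replaced A's three-stage pipeline (collect a set of keys, sort it, partition into two lists, concatenate) by a single streaming pass that inserts each field, as it is encountered, into one of two strictly sorted duplicate-free lists via recursive ordered insertion (no set, no sort call).
import Mathlib
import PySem

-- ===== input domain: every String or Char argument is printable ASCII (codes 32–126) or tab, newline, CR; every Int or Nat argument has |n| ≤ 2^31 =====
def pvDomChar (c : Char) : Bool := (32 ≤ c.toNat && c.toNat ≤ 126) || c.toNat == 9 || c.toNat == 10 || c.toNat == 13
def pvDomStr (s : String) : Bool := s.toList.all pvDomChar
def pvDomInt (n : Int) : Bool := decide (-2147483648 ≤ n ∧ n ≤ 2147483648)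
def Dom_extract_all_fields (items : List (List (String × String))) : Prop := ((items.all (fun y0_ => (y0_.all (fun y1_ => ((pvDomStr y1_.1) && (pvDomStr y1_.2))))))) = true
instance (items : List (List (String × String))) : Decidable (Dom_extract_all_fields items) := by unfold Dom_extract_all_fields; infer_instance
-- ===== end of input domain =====

-- B drops A's set + sort + partition pipeline: it streams the fields once, keeping two
-- strictly sorted duplicate-free lists by ordered insertion; objective: alternative.

-- shared helper: the test "'image' in field.lower()" appearing in both Pythons
def pvP (field : String) : Bool := PySem.Str.isIn "image" (PySem.Str.lower field)

-- ===== PORT A =====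
def extract_all_fields (items : List (List (String × String))) : List String :=
  -- all_fields = set(); for item in items: all_fields.update(item.keys())
  let all_fields : PySem.Set String :=
    items.foldl (fun s item => PySem.Set.update s (item.map Prod.fst)) PySem.Set.empty
  -- for field in sorted(all_fields): append to image_fields / other_fields
  let oi :=
    (PySem.List.sorted all_fields (fun x => x)).foldl
      (fun (oi : List String × List String) field =>
        if pvP field then (oi.1, oi.2 ++ [field])
        else (oi.1 ++ [field], oi.2))
      ([], [])
  -- return other_fields + image_fields
  oi.1 ++ oi.2

-- ===== PORT B =====
-- _insert_unique(field, lst): insert into a strictly sorted list, skipping duplicates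
def insertUnique (field : String) : List String → List String
  | [] => [field]
  | y :: ys =>
    if y < field then y :: insertUnique field ys
    else if y = field then y :: ys
    else field :: y :: ys

def extract_all_fields_alt (items : List (List (String × String))) : List String :=
  -- other, image = [], []; for item in items: for field in item.keys(): insert into a bucket
  let oi :=
    items.foldl
      (fun (oi : List String × List String) item =>
        (item.map Prod.fst).foldl
          (fun (oi : List String × List String) field =>
            if pvP field then (oi.1, insertUnique field oi.2)
            else (insertUnique field oi.1, oi.2))
          oi)
      ([], [])
  -- return other + image
  oi.1 ++ oi.2

-- ===== PRECONDITION & SPEC =====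
def Spec_extract_all_fields (items : List (List (String × String))) (out : List String) : Prop := out = extract_all_fields_alt items
instance (items : List (List (String × String))) (out : List String) : Decidable (Spec_extract_all_fields items out) := by unfold Spec_extract_all_fields; infer_instance

-- ===== CLAIM (what is proved, stated in full; the proofs are below) =====
def Claim_equal_extract_all_fields : Prop := ∀ (items : List (List (String × String))), Dom_extract_all_fields items → Spec_extract_all_fields items (extract_all_fields items)

-- ===== LEMMAS AND PROOFS =====

-- membership in an ordered insertion
theorem pv_mem_insertUnique (f x : String) (l : List String) :
    x ∈ insertUnique f l ↔ x = f ∨ x ∈ l := by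
  induction l with
  | nil => simp [insertUnique]
  | cons y ys ih =>
    unfold insertUnique
    split_ifs with h1 h2 <;> subst_eqs <;> simp only [List.mem_cons, ih] <;> tauto

-- ordered insertion keeps the list strictly increasing
theorem pv_pairwise_insertUnique (f : String) (l : List String)
    (h : l.Pairwise (· < ·)) : (insertUnique f l).Pairwise (· < ·) := by
  induction l with
  | nil => simp [insertUnique]
  | cons y ys ih =>
    rcases List.pairwise_cons.mp h with ⟨hy, hys⟩
    unfold insertUnique
    split_ifs with h1 h2
    · refine List.pairwise_cons.mpr ⟨?_, ih hys⟩
      intro z hz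
      rcases (pv_mem_insertUnique f z ys).mp hz with rfl | hz
      · exact h1
      · exact hy z hz
    · exact h
    · have hfy : f < y := lt_of_le_of_ne (not_lt.mp h1) (Ne.symm h2)
      refine List.pairwise_cons.mpr ⟨?_, h⟩
      intro z hz
      rcases List.mem_cons.mp hz with rfl | hz
      · exact hfy
      · exact lt_trans hfy (hy z hz)

-- invariant of B's streaming loop over one flat list of fields
theorem pv_foldl_insert (F : List String) (o i : List String)
    (ho : o.Pairwise (· < ·)) (hi : i.Pairwise (· < ·)) :
    (F.foldl (fun (oi : List String × List String) field =>
        if pvP field then (oi.1, insertUnique field oi.2)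
        else (insertUnique field oi.1, oi.2)) (o, i)).1.Pairwise (· < ·) ∧
    (F.foldl (fun (oi : List String × List String) field =>
        if pvP field then (oi.1, insertUnique field oi.2)
        else (insertUnique field oi.1, oi.2)) (o, i)).2.Pairwise (· < ·) ∧
    (∀ x, x ∈ (F.foldl (fun (oi : List String × List String) field =>
        if pvP field then (oi.1, insertUnique field oi.2)
        else (insertUnique field oi.1, oi.2)) (o, i)).1 ↔ x ∈ o ∨ (x ∈ F ∧ pvP x = false)) ∧
    (∀ x, x ∈ (F.foldl (fun (oi : List String × List String) field =>
        if pvP field then (oi.1, insertUnique field oi.2)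
        else (insertUnique field oi.1, oi.2)) (o, i)).2 ↔ x ∈ i ∨ (x ∈ F ∧ pvP x = true)) := by
  induction F generalizing o i with
  | nil => exact ⟨ho, hi, by simp, by simp⟩
  | cons f F ih =>
    by_cases hp : pvP f = true
    · simp only [List.foldl_cons, if_pos hp]
      obtain ⟨h1, h2, h3, h4⟩ := ih o (insertUnique f i) ho (pv_pairwise_insertUnique f i hi)
      refine ⟨h1, h2, ?_, ?_⟩
      · intro x
        rw [h3 x]
        simp only [List.mem_cons]
        constructor
        · rintro (hx | ⟨hx, hpx⟩)
          · exact Or.inl hx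
          · exact Or.inr ⟨Or.inr hx, hpx⟩
        · rintro (hx | ⟨hx | hx, hpx⟩)
          · exact Or.inl hx
          · exact absurd (hx ▸ hpx) (by simp [hp])
          · exact Or.inr ⟨hx, hpx⟩
      · intro x
        rw [h4 x, pv_mem_insertUnique]
        simp only [List.mem_cons]
        constructor
        · rintro ((rfl | hx) | ⟨hx, hpx⟩)
          · exact Or.inr ⟨Or.inl rfl, hp⟩
          · exact Or.inl hx
          · exact Or.inr ⟨Or.inr hx, hpx⟩
        · rintro (hx | ⟨hx | hx, hpx⟩)
          · exact Or.inl (Or.inr hx)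
          · exact Or.inl (Or.inl hx)
          · exact Or.inr ⟨hx, hpx⟩
    · simp only [List.foldl_cons, if_neg hp]
      have hpf : pvP f = false := by simpa using hp
      obtain ⟨h1, h2, h3, h4⟩ := ih (insertUnique f o) i (pv_pairwise_insertUnique f o ho) hi
      refine ⟨h1, h2, ?_, ?_⟩
      · intro x
        rw [h3 x, pv_mem_insertUnique]
        simp only [List.mem_cons]
        constructor
        · rintro ((rfl | hx) | ⟨hx, hpx⟩)
          · exact Or.inr ⟨Or.inl rfl, hpf⟩
          · exact Or.inl hx
          · exact Or.inr ⟨Or.inr hx, hpx⟩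
        · rintro (hx | ⟨hx | hx, hpx⟩)
          · exact Or.inl (Or.inr hx)
          · exact Or.inl (Or.inl hx)
          · exact Or.inr ⟨hx, hpx⟩
      · intro x
        rw [h4 x]
        simp only [List.mem_cons]
        constructor
        · rintro (hx | ⟨hx, hpx⟩)
          · exact Or.inl hx
          · exact Or.inr ⟨Or.inr hx, hpx⟩
        · rintro (hx | ⟨hx | hx, hpx⟩)
          · exact Or.inl hx
          · exact absurd (hx ▸ hpx) (by simp [hpf])
          · exact Or.inr ⟨hx, hpx⟩

-- A's partition loop accumulates the two filters
theorem pv_foldl_partition (L : List String) (o i : List String) :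
    L.foldl (fun (oi : List String × List String) field =>
        if pvP field then (oi.1, oi.2 ++ [field]) else (oi.1 ++ [field], oi.2)) (o, i)
      = (o ++ L.filter (fun f => !pvP f), i ++ L.filter pvP) := by
  induction L generalizing o i with
  | nil => simp
  | cons x xs ih =>
    by_cases h : pvP x <;> simp [h, ih, List.append_assoc]

-- the field set (built by A's first loop) has no duplicates
theorem pv_nodup_fieldset (items : List (List (String × String))) :
    (items.foldl (fun s item => PySem.Set.update s (item.map Prod.fst))
      (PySem.Set.empty : PySem.Set String)).Nodup := by
  have h : ∀ (s : PySem.Set String), s.Nodup →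
      (items.foldl (fun s item => PySem.Set.update s (item.map Prod.fst)) s).Nodup := by
    induction items with
    | nil => intro s hs; simpa using hs
    | cons it its ih =>
      intro s hs
      exact ih _ (PySem.Set.nodup_update s (it.map Prod.fst) hs)
  exact h _ (by simp [PySem.Set.empty])

-- membership in A's field set = membership in the flattened key stream
theorem pv_mem_fieldset (items : List (List (String × String))) (x : String) :
    x ∈ items.foldl (fun s item => PySem.Set.update s (item.map Prod.fst))
        (PySem.Set.empty : PySem.Set String)
      ↔ x ∈ (items.map (fun item => item.map Prod.fst)).flatten := by
  have h : ∀ (s : PySem.Set String),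
      (x ∈ items.foldl (fun s item => PySem.Set.update s (item.map Prod.fst)) s
        ↔ x ∈ s ∨ x ∈ (items.map (fun item => item.map Prod.fst)).flatten) := by
    induction items with
    | nil => intro s; simp
    | cons it its ih =>
      intro s
      simp only [List.foldl_cons, List.map_cons, List.flatten_cons, List.mem_append]
      rw [ih, PySem.Set.mem_update]
      tauto
  simpa [PySem.Set.empty] using h []

-- two strictly increasing lists with the same members are equal
theorem pv_eq_of_pairwise_lt_of_mem_iff (l1 l2 : List String)
    (h1 : l1.Pairwise (· < ·)) (h2 : l2.Pairwise (· < ·))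
    (h : ∀ x, x ∈ l1 ↔ x ∈ l2) : l1 = l2 := by
  have n1 : l1.Nodup := h1.imp (fun h => ne_of_lt h)
  have n2 : l2.Nodup := h2.imp (fun h => ne_of_lt h)
  have hp : l1.Perm l2 := (List.perm_ext_iff_of_nodup n1 n2).mpr h
  exact hp.eq_of_pairwise (fun a b _ _ ha hb => le_antisymm ha hb)
    (h1.imp le_of_lt) (h2.imp le_of_lt)

-- ===== VERDICT (by name: the statement is the Claim_ definition above) =====
set_option maxHeartbeats 1000000 in
theorem extract_all_fields_spec : Claim_equal_extract_all_fields := by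
  intro items _
  unfold Spec_extract_all_fields extract_all_fields extract_all_fields_alt
  dsimp only
  set S : PySem.Set String :=
    items.foldl (fun s item => PySem.Set.update s (item.map Prod.fst)) PySem.Set.empty with hS
  set L : List String := PySem.List.sorted S (fun x => x) with hL
  set F : List String := (items.map (fun item => item.map Prod.fst)).flatten with hF
  -- L is strictly increasing, with the members of the key stream
  have hnd : L.Nodup := ((PySem.List.sorted_perm S (fun x => x) false).nodup_iff).mpr
    (pv_nodup_fieldset items)
  have hle : L.Pairwise (fun a b => a ≤ b) := by
    simpa using PySem.List.sorted_pairwise S (fun x => x)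
  have hlt : L.Pairwise (fun a b : String => a < b) :=
    (hle.and hnd).imp (fun h => lt_of_le_of_ne h.1 h.2)
  have hmemL : ∀ x, x ∈ L ↔ x ∈ F := by
    intro x
    rw [hL, PySem.List.mem_sorted, hS, pv_mem_fieldset]
  -- A's value: the two filters of L
  rw [pv_foldl_partition L [] []]
  simp only [List.nil_append]
  -- B's value: the nested fold is the fold over the flattened key stream
  rw [show (items.foldl
      (fun (oi : List String × List String) item =>
        (item.map Prod.fst).foldl
          (fun (oi : List String × List String) field =>
            if pvP field then (oi.1, insertUnique field oi.2)
            else (insertUnique field oi.1, oi.2)) oi)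
      ([], []))
    = F.foldl (fun (oi : List String × List String) field =>
        if pvP field then (oi.1, insertUnique field oi.2)
        else (insertUnique field oi.1, oi.2)) ([], []) by
      rw [hF, List.foldl_flatten, List.foldl_map]]
  obtain ⟨hb1, hb2, hm1, hm2⟩ := pv_foldl_insert F [] [] List.Pairwise.nil List.Pairwise.nil
  congr 1
  · refine pv_eq_of_pairwise_lt_of_mem_iff _ _ (hlt.filter _) hb1 ?_
    intro x
    rw [hm1 x, List.mem_filter, hmemL x]
    simp
  · refine pv_eq_of_pairwise_lt_of_mem_iff _ _ (hlt.filter _) hb2 ?_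
    intro x
    rw [hm2 x, List.mem_filter, hmemL x]
    simp
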